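-- pv_equiv track=rewrite | github.com/kingfischer16/antigine | antigine/cli/commands/init.py | _find_close_matches
-- ===== SOURCE A (Python) =====
-- def _find_close_matches(input_text: str, available_options: list, max_suggestions: int = 3) -> list:
--     """
--     Find close matches for typos or partial inputs.
--
--     Args:
--         input_text: User input text
--         available_options: List of valid options
--         max_suggestions: Maximum number of suggestions to return
--
--     Returns:
--         list: List of suggested corrections
--     """
--     input_lower = input_text.lower()
--     suggestions = []
--
--     # Look for partial matches (substring matching)
--     for option in available_options:
--         option_lower = option.lower()
--         if input_lower in option_lower or option_lower in input_lower:
--             suggestions.append(option)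
--
--     # If no partial matches, look for options that start with the same letter
--     if not suggestions:
--         for option in available_options:
--             if option.lower().startswith(input_lower[0]):
--                 suggestions.append(option)
--
--     return suggestions[:max_suggestions]
-- ===== SOURCE B (Python) =====
-- def _find_close_matches(input_text: str, available_options: list, max_suggestions: int = 3) -> list:
--     """Single pass: bucket each option as substring match or first-letter match, then pick."""
--     input_lower = input_text.lower()
--     first = input_lower[:1]
--     substring_matches = []
--     prefix_matches = []
--     for option in available_options:
--         option_lower = option.lower()
--         if input_lower in option_lower or option_lower in input_lower:
--             substring_matches.append(option)
--         elif option_lower.startswith(first):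
--             prefix_matches.append(option)
--     return (substring_matches or prefix_matches)[:max_suggestions]
-- ===== Notes on version B (the rewrite author's own statement) =====
-- stated objective: simpler
-- what changed: Replaces A's two sequential scans (substring pass, then a conditional whole-list prefix pass) with one loop that buckets each option into substring or first-letter matches and picks the non-empty bucket, using input_lower[:1] so no indexing is needed.
import Mathlib
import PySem

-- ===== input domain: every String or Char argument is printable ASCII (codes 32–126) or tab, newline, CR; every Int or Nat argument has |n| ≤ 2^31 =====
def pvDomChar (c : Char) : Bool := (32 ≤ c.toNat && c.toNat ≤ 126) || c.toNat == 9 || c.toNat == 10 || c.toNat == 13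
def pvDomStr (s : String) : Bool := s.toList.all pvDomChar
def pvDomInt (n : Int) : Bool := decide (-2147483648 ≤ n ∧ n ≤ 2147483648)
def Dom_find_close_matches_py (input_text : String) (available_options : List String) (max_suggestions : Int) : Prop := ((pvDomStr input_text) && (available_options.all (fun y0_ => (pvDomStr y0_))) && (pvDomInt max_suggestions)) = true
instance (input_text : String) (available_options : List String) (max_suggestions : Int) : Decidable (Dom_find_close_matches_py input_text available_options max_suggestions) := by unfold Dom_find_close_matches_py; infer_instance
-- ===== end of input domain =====

-- B folds A's two sequential scans into one bucketing loop and slices with [:1] instead of indexing: simpler, same cost.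

-- ===== PORT A =====
def find_close_matches_py (input_text : String) (available_options : List String) (max_suggestions : Int) : List String :=
  let input_lower := PySem.Str.lower input_text
  let suggestions := available_options.foldl (fun acc option =>
    let option_lower := PySem.Str.lower option
    if PySem.Str.isIn input_lower option_lower || PySem.Str.isIn option_lower input_lower
    then acc ++ [option] else acc) []
  let suggestions :=
    if suggestions.isEmpty then
      available_options.foldl (fun acc option =>
        match PySem.Str.pyGet? input_lower 0 with   -- input_lower[0]; 'none' (Python's IndexError) is unreachable: empty input always substring-matches
        | some c => if PySem.Str.startswith (PySem.Str.lower option) (String.ofList [c]) then acc ++ [option] else acc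
        | none => acc) []
    else suggestions
  PySem.List.slice suggestions none (some max_suggestions)

-- ===== PORT B =====
def find_close_matches_py_alt (input_text : String) (available_options : List String) (max_suggestions : Int) : List String :=
  let input_lower := PySem.Str.lower input_text
  let first := PySem.Str.slice input_lower none (some 1)
  let p := available_options.foldl (fun (acc : List String × List String) option =>
    let option_lower := PySem.Str.lower option
    if PySem.Str.isIn input_lower option_lower || PySem.Str.isIn option_lower input_lower
    then (acc.1 ++ [option], acc.2)
    else if PySem.Str.startswith option_lower first then (acc.1, acc.2 ++ [option])
    else acc) ([], [])
  PySem.List.slice (if p.1.isEmpty then p.2 else p.1) none (some max_suggestions)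

-- ===== PRECONDITION & SPEC =====
def Spec_find_close_matches_py (input_text : String) (available_options : List String) (max_suggestions : Int) (out : List String) : Prop := out = find_close_matches_py_alt input_text available_options max_suggestions
instance (input_text : String) (available_options : List String) (max_suggestions : Int) (out : List String) : Decidable (Spec_find_close_matches_py input_text available_options max_suggestions out) := by unfold Spec_find_close_matches_py; infer_instance

-- ===== CLAIM (what is proved, stated in full; the proofs are below) =====
def Claim_equal_find_close_matches_py : Prop := ∀ (input_text : String) (available_options : List String) (max_suggestions : Int), Dom_find_close_matches_py input_text available_options max_suggestions → Spec_find_close_matches_py input_text available_options max_suggestions (find_close_matches_py input_text available_options max_suggestions)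

-- ===== LEMMAS AND PROOFS =====

-- B's bucketing loop is a pair of filters (second bucket: fails c1, passes c2).
theorem bfold_eq (c1 c2 : String → Bool) (xs : List String) (a b : List String) :
    xs.foldl (fun (acc : List String × List String) o =>
      if c1 o then (acc.1 ++ [o], acc.2)
      else if c2 o then (acc.1, acc.2 ++ [o]) else acc) (a, b)
    = (a ++ xs.filter c1, b ++ xs.filter (fun o => !c1 o && c2 o)) := by
  induction xs generalizing a b with
  | nil => simp
  | cons x xs ih =>
    by_cases h1 : c1 x
    · simp [h1, ih]
    · by_cases h2 : c2 x <;> simp [h1, h2, ih]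

theorem find_close_matches_py_spec : Claim_equal_find_close_matches_py := by
  intro input_text available_options max_suggestions _
  unfold Spec_find_close_matches_py find_close_matches_py find_close_matches_py_alt
  simp only []
  set il := PySem.Str.lower input_text with hil
  set c1 : String → Bool :=
    fun o => PySem.Str.isIn il (PySem.Str.lower o) || PySem.Str.isIn (PySem.Str.lower o) il with hc1
  have hA1 : List.foldl (fun acc option => if c1 option then acc ++ [option] else acc)
      [] available_options = available_options.filter c1 := by
    simpa using PySem.List.foldl_append_if c1 id available_options []
  rw [hA1, bfold_eq c1 (fun o => PySem.Str.startswith (PySem.Str.lower o) (PySem.Str.slice il none (some 1)))]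
  simp only [List.nil_append]
  by_cases hF : available_options.filter c1 = []
  · -- no substring matches: A's second scan equals B's prefix bucket
    rw [hF]
    simp only [List.isEmpty_nil, if_true]
    congr 1
    cases h : PySem.List.pyGet? il.toList 0 with
    | none =>
      -- il is empty, so every option substring-matches; with filter c1 = [] the list must be empty
      have hnil : il.toList = [] := by
        cases hc : il.toList with
        | nil => rfl
        | cons c cs => rw [hc] at h; simp [PySem.List.pyGet?, PySem.List.pyIdx?] at h
      have hopts : available_options = [] := by
        cases ho : available_options with
        | nil => rfl
        | cons x xs =>
          exfalso
          have hx : c1 x = true := by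
            simp [hc1, PySem.Str.isIn_eq, hnil, PySem.Chars.isIn_nil]
          have : x ∈ available_options.filter c1 := by
            rw [List.mem_filter]; exact ⟨by simp [ho], hx⟩
          simp [hF] at this
      simp [hopts]
    | some c =>
      obtain ⟨cs, hc⟩ : ∃ cs, il.toList = c :: cs := by
        cases hc : il.toList with
        | nil => rw [hc] at h; simp [PySem.List.pyGet?, PySem.List.pyIdx?] at h
        | cons c' cs =>
          rw [hc] at h
          simp [PySem.List.pyGet?, PySem.List.pyIdx?] at h
          exact ⟨cs, by rw [h]⟩
      have hget : PySem.Str.pyGet? il 0 = some c := by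
        simp [PySem.Str.pyGet?_eq, PySem.Chars.pyGet?_eq_listPyGet?, h]
      simp only [hget]
      have hfa := PySem.List.foldl_append_if
            (fun option => PySem.Str.startswith (PySem.Str.lower option) (String.ofList [c]))
            id available_options []
      simp only [id_eq, List.map_id, List.nil_append] at hfa
      rw [hfa]
      apply List.filter_congr
      intro o ho
      have h1 : c1 o = false := by
        by_contra hcon
        have : o ∈ available_options.filter c1 := by
          rw [List.mem_filter]; exact ⟨ho, by simpa using hcon⟩
        simp [hF] at this
      have hfirst : (PySem.Str.slice il none (some 1)).toList = [c] := by
        rw [PySem.Str.toList_slice, PySem.Chars.slice_eq_listSlice, hc]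
        have := PySem.List.slice_to_natCast (c :: cs) 1
        simpa using this
      simp [h1, PySem.Str.startswith_eq, hfirst]
  · -- substring matches exist: both return the first bucket
    have : (available_options.filter c1).isEmpty = false := by
      simpa [List.isEmpty_iff] using hF
    rw [this]
    simp

-- ===== VERDICT (by name: the statement is the Claim_ definition above) =====
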